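-- pv_equiv track=rewrite | github.com/michelecatani/funStuff | strings.py | func
-- ===== SOURCE A (Python) =====
-- def func(original, add, delete) -> list:
--
--     ## using sets just to get rid of the potential duplicate problem
--
--     sOG = set()
--     sADD = set()
--     sDEL = set()
--     sResult = set()
--
--     for i in original:
--         sResult.add(i)
--     for i in add:
--         sResult.add(i)
--
--     for i in delete:
--         if i in sResult:
--             sResult.discard(i)
--
--     ## get a list from the set
--
--     result = list(sResult)
--
--     ## define a function to be used in sorting
--
--     def compare(string1, string2) -> bool:
--         if len(string1) < len(string2):
--             return False
--         elif len(string1) > len(string2):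
--             return True
--         else:
--             if string1 < string2:
--                 return False
--             return True
--
--
--     ## implement merge sort with the function listed above
--
--     def sort(result) -> list:
--         if len(result) > 1:
--
--             mid = len(result)//2
--
--             L = result[:mid]
--
--             R = result[mid:]
--
--             sort(L)
--
--             sort(R)
--
--             i = j = k = 0
--
--             while i < len(L) and j < len(R):
--                 if compare(L[i], R[j]):
--                     result[k] = L[i]
--                     i += 1
--                 else:
--                     result[k] = R[j]
--                     j += 1
--                 k += 1
--
--             while i < len(L):
--                 result[k] = L[i]
--                 i += 1
--                 k += 1
--             while j < len(R):
--                 result[k] = R[j]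
--                 j += 1
--                 k += 1
--
--         return result
--
--     return sort(result)
-- ===== SOURCE B (Python) =====
-- def func(original, add, delete) -> list:
--     pool = set(original)
--     pool.update(add)
--     for d in delete:
--         pool.discard(d)
--     buckets = {}
--     for s in pool:
--         buckets.setdefault(len(s), []).append(s)
--     out = []
--     for length in sorted(buckets, reverse=True):
--         out.extend(sorted(buckets[length], reverse=True))
--     return out
-- ===== Notes on version B (the rewrite author's own statement) =====
-- stated objective: faster
-- what changed: Replaces the hand-written merge sort over the whole deduped list with a length-indexed bucket dict: lengths are visited in descending order and each bucket is reverse-sorted separately, so no single whole-list comparator sort remains.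
import Mathlib
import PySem

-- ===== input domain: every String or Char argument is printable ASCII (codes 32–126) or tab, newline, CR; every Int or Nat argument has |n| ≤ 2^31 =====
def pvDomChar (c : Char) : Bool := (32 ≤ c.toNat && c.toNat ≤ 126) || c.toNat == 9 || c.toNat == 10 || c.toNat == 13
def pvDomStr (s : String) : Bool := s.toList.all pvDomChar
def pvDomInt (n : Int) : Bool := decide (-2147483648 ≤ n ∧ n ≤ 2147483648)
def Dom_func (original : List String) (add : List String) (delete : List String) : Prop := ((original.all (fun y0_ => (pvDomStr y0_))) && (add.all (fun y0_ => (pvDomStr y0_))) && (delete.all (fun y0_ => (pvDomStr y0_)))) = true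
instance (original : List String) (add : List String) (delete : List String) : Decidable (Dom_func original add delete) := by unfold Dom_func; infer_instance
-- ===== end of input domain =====

-- B replaces A's hand-written whole-list merge sort by a length-indexed bucket dict emitted in
-- descending key order with each bucket reverse-sorted (objective: faster, constant-factor).
-- A's Python 'sort' mutates its list argument in place; the equivalence proved here is about the
-- return value only (both top-level functions leave their arguments unobserved).

-- ===== PORT A =====
-- compare(string1, string2): True iff string1 should precede string2 (longer first, then lex-descending)
def pvCompare (string1 string2 : String) : Bool :=
  if PySem.Str.len string1 < PySem.Str.len string2 then false
  else if PySem.Str.len string2 < PySem.Str.len string1 then true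
  else if string1 < string2 then false else true

-- the merge phase of A's in-place merge sort, written functionally (result[k] writes = building the list)
def pvMerge : List String → List String → List String
  | [], R => R
  | x :: L, [] => x :: L
  | x :: L, y :: R => if pvCompare x y then x :: pvMerge L (y :: R) else y :: pvMerge (x :: L) R

-- sort(result): len(result)//2 on the nonnegative length is Nat division
def pvMsort (result : List String) : List String :=
  if h : 1 < result.length then
    pvMerge (pvMsort (result.take (result.length / 2))) (pvMsort (result.drop (result.length / 2)))
  else result
termination_by result.length
decreasing_by
  · simp only [List.length_take]; omega
  · simp only [List.length_drop]; omega

def func (original : List String) (add : List String) (delete : List String) : List String :=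
  let s1 : PySem.Set String := original.foldl PySem.Set.add PySem.Set.empty
  let s2 : PySem.Set String := add.foldl PySem.Set.add s1
  let sResult : PySem.Set String :=
    delete.foldl (fun s i => if PySem.Set.contains s i then PySem.Set.discard s i else s) s2
  pvMsort sResult

-- ===== PORT B =====
def func_alt (original : List String) (add : List String) (delete : List String) : List String :=
  let pool0 : PySem.Set String := PySem.Set.update (PySem.Set.ofList original) add
  let pool : PySem.Set String := delete.foldl PySem.Set.discard pool0
  let buckets : PySem.Dict Int (List String) :=
    pool.foldl (fun d s => d.modify (PySem.Str.len s) [] (fun b => b ++ [s])) PySem.Dict.empty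
  (PySem.List.sorted buckets.keys (fun k => k) true).foldl
    (fun out k => out ++ PySem.List.sorted (buckets.getD k []) (fun s => s) true) []

-- ===== PRECONDITION & SPEC =====
def Spec_func (original : List String) (add : List String) (delete : List String) (out : List String) : Prop := out = func_alt original add delete
instance (original : List String) (add : List String) (delete : List String) (out : List String) : Decidable (Spec_func original add delete out) := by unfold Spec_func; infer_instance

-- ===== CLAIM (what is proved, stated in full; the proofs are below) =====
def Claim_equal_func : Prop := ∀ (original : List String) (add : List String) (delete : List String), Dom_func original add delete → Spec_func original add delete (func original add delete)

-- ===== LEMMAS AND PROOFS =====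

-- the order A's comparator realises, as a Prop
def pvLe (a b : String) : Prop := pvCompare a b = true

theorem pvCompare_iff (a b : String) :
    pvCompare a b = true ↔
      PySem.Str.len b < PySem.Str.len a ∨ (PySem.Str.len a = PySem.Str.len b ∧ ¬ a < b) := by
  unfold pvCompare
  split_ifs with h1 h2 h3 <;> simp_all <;> omega

theorem pvCompare_false {a b : String} (h : pvCompare a b = false) : pvCompare b a = true := by
  rw [pvCompare_iff]
  have h' : ¬ pvCompare a b = true := by simp [h]
  rw [pvCompare_iff] at h'
  rw [not_or] at h'
  obtain ⟨h1, h2⟩ := h'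
  rcases lt_trichotomy (PySem.Str.len a) (PySem.Str.len b) with hl | hl | hl
  · exact Or.inl hl
  · exact Or.inr ⟨hl.symm, fun hba => absurd (not_not.mp (not_and.mp h2 hl)) (by simpa using (lt_asymm hba))⟩
  · omega
theorem pvCompare_trans {a b c : String} (h1 : pvCompare a b = true) (h2 : pvCompare b c = true) :
    pvCompare a c = true := by
  rw [pvCompare_iff] at h1 h2 ⊢
  rcases h1 with h1 | ⟨h1, h1'⟩ <;> rcases h2 with h2 | ⟨h2, h2'⟩
  · exact Or.inl (by omega)
  · exact Or.inl (by omega)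
  · exact Or.inl (by omega)
  · exact Or.inr ⟨by omega, fun hac => by
      rcases lt_trichotomy a b with hab | hab | hab
      · exact h1' hab
      · exact h2' (hab ▸ hac)
      · exact h2' (lt_trans hab hac)⟩

theorem pvCompare_antisymm {a b : String} (h1 : pvCompare a b = true) (h2 : pvCompare b a = true) :
    a = b := by
  rw [pvCompare_iff] at h1 h2
  rcases h1 with h1 | ⟨_, h1'⟩ <;> rcases h2 with h2 | ⟨_, h2'⟩ <;> try omega
  exact le_antisymm (not_lt.mp h2') (not_lt.mp h1')

theorem pvMerge_perm (L R : List String) : (pvMerge L R).Perm (L ++ R) := by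
  match L, R with
  | [], R => simp [pvMerge]
  | x :: L, [] => simp [pvMerge]
  | x :: L, y :: R =>
    by_cases h : pvCompare x y = true
    · rw [show pvMerge (x :: L) (y :: R) = x :: pvMerge L (y :: R) from by rw [pvMerge, if_pos h]]
      exact (pvMerge_perm L (y :: R)).cons x
    · rw [show pvMerge (x :: L) (y :: R) = y :: pvMerge (x :: L) R from by
        rw [pvMerge, if_neg h]]
      exact ((pvMerge_perm (x :: L) R).cons y).trans List.perm_middle.symm
termination_by L.length + R.length
decreasing_by all_goals (simp only [List.length_cons]; omega)

theorem pvMerge_pairwise (L R : List String) (hL : L.Pairwise pvLe) (hR : R.Pairwise pvLe) :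
    (pvMerge L R).Pairwise pvLe := by
  match L, R with
  | [], R => simpa [pvMerge] using hR
  | x :: L, [] => simpa [pvMerge] using hL
  | x :: L, y :: R =>
    obtain ⟨hx, hL'⟩ := List.pairwise_cons.mp hL
    obtain ⟨hy, hR'⟩ := List.pairwise_cons.mp hR
    by_cases h : pvCompare x y = true
    · rw [show pvMerge (x :: L) (y :: R) = x :: pvMerge L (y :: R) from by rw [pvMerge, if_pos h]]
      refine List.pairwise_cons.mpr ⟨?_, pvMerge_pairwise L (y :: R) hL' hR⟩
      intro z hz
      rcases List.mem_append.mp ((pvMerge_perm L (y :: R)).mem_iff.mp hz) with hz | hz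
      · exact hx z hz
      · rcases List.mem_cons.mp hz with rfl | hz
        · exact h
        · exact pvCompare_trans h (hy z hz)
    · rw [show pvMerge (x :: L) (y :: R) = y :: pvMerge (x :: L) R from by
        rw [pvMerge, if_neg h]]
      have hyx : pvCompare y x = true := pvCompare_false (Bool.eq_false_iff.mpr h)
      refine List.pairwise_cons.mpr ⟨?_, pvMerge_pairwise (x :: L) R hL hR'⟩
      intro z hz
      rcases List.mem_append.mp ((pvMerge_perm (x :: L) R).mem_iff.mp hz) with hz | hz
      · rcases List.mem_cons.mp hz with rfl | hz
        · exact hyx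
        · exact pvCompare_trans hyx (hx z hz)
      · exact hy z hz
termination_by L.length + R.length
decreasing_by all_goals (simp only [List.length_cons]; omega)

theorem pvMsort_perm (l : List String) : (pvMsort l).Perm l := by
  rw [pvMsort]
  split
  · next h =>
    refine (pvMerge_perm _ _).trans ?_
    exact ((pvMsort_perm (l.take (l.length / 2))).append
      (pvMsort_perm (l.drop (l.length / 2)))).trans (by rw [List.take_append_drop])
  · exact .refl _
termination_by l.length
decreasing_by
  · simp only [List.length_take]; omega
  · simp only [List.length_drop]; omega

theorem pvMsort_pairwise (l : List String) : (pvMsort l).Pairwise pvLe := by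
  rw [pvMsort]
  split
  · next h =>
    exact pvMerge_pairwise _ _ (pvMsort_pairwise (l.take (l.length / 2)))
      (pvMsort_pairwise (l.drop (l.length / 2)))
  · next h =>
    rcases l with _ | ⟨a, _ | ⟨b, t⟩⟩
    · exact List.Pairwise.nil
    · exact List.pairwise_singleton _ a
    · exact absurd (by simp only [List.length_cons]; omega) h
termination_by l.length
decreasing_by
  · simp only [List.length_take]; omega
  · simp only [List.length_drop]; omega

-- the guarded discard of A's delete loop is Set.discard
theorem pv_discard_guard (s : PySem.Set String) (i : String) :
    (if PySem.Set.contains s i then PySem.Set.discard s i else s) = PySem.Set.discard s i := by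
  split
  · rfl
  · next h =>
    symm
    simp only [PySem.Set.discard]
    refine List.filter_eq_self.mpr fun y hy => ?_
    simp only [PySem.Set.contains] at h
    simp only [Bool.not_eq_eq_eq_not, Bool.not_true, beq_eq_false_iff_ne, ne_eq]
    rintro rfl
    exact h (List.elem_eq_true_of_mem hy)

-- both ports build the same deduplicated pool
theorem pv_pool_eq (original add delete : List String) :
    delete.foldl (fun s i => if PySem.Set.contains s i then PySem.Set.discard s i else s)
      (add.foldl PySem.Set.add (original.foldl PySem.Set.add PySem.Set.empty))
    = delete.foldl PySem.Set.discard (PySem.Set.update (PySem.Set.ofList original) add) := by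
  have hf : (fun (s : PySem.Set String) i =>
      if PySem.Set.contains s i then PySem.Set.discard s i else s) = PySem.Set.discard := by
    funext s i; exact pv_discard_guard s i
  rw [hf, PySem.Set.ofList_eq_foldl, PySem.Set.update, PySem.Set.empty]

-- the bucket dict's entry at k is the pool elements of length k, in pool order
theorem pv_bucket_getD (pool : List String) (k : Int) :
    (pool.foldl (fun d s => d.modify (PySem.Str.len s) [] (fun b => b ++ [s]))
      PySem.Dict.empty).getD k []
    = pool.filter (fun s => PySem.Str.len s == k) := by
  have hmap : pool.foldl (fun d s => d.modify (PySem.Str.len s) [] (fun b => b ++ [s]))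
        PySem.Dict.empty
      = (pool.map (fun s => (PySem.Str.len s, s))).foldl
          (fun d p => d.modify p.1 [] (fun b => b ++ [p.2])) PySem.Dict.empty :=
    (List.foldl_map (f := fun s => (PySem.Str.len s, s))
      (g := fun d p => d.modify p.1 [] (fun b => b ++ [p.2]))
      (l := pool) (init := PySem.Dict.empty)).symm
  rw [hmap, PySem.Dict.getD_foldl_modify_append]
  simp [List.filter_map, Function.comp_def]

-- the bucket dict's keys are the distinct lengths occurring in the pool
theorem pv_bucket_keys (pool : List String) :
    (pool.foldl (fun d s => d.modify (PySem.Str.len s) [] (fun b => b ++ [s]))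
      PySem.Dict.empty).keys
    = PySem.Set.ofList (pool.map PySem.Str.len) := by
  have h := PySem.Dict.keys_foldl_modify_key pool PySem.Str.len []
    (fun _ s b => b ++ [s]) PySem.Dict.empty
  simpa [PySem.Set.ofList_eq_foldl, PySem.Set.update, PySem.Set.empty] using h

-- concatenating, over a duplicate-free list of keys covering every occurring length,
-- the length-k elements of the pool is a permutation of the pool
theorem pv_partition_perm (ks : List Int) (pool : List String) (hnd : ks.Nodup)
    (hcov : ∀ s ∈ pool, PySem.Str.len s ∈ ks) :
    (ks.flatMap (fun k => pool.filter (fun s => PySem.Str.len s == k))).Perm pool := by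
  induction ks generalizing pool with
  | nil =>
    have : pool = [] := List.eq_nil_iff_forall_not_mem.mpr fun s hs => by simpa using hcov s hs
    simp [this]
  | cons k ks ih =>
    obtain ⟨hk, hnd'⟩ := List.nodup_cons.mp hnd
    rw [List.flatMap_cons]
    have hrest : ∀ k' ∈ ks,
        pool.filter (fun s => PySem.Str.len s == k')
        = (pool.filter (fun s => !(PySem.Str.len s == k))).filter
            (fun s => PySem.Str.len s == k') := by
      intro k' hk'
      rw [List.filter_filter]
      refine List.filter_congr fun s _ => ?_
      cases hb : (PySem.Str.len s == k') with
      | false => simp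
      | true =>
        have he : PySem.Str.len s = k' := eq_of_beq hb
        have hkk' : k' ≠ k := fun e => hk (e ▸ hk')
        have h2 : (PySem.Str.len s == k) = false := beq_eq_false_iff_ne.mpr (he ▸ hkk')
        have h2' : ¬ (s.length : Int) = k := by simpa using h2
        simp [h2']
    have hmapc : ks.flatMap (fun k' => pool.filter (fun s => PySem.Str.len s == k'))
        = ks.flatMap (fun k' => (pool.filter (fun s => !(PySem.Str.len s == k))).filter
            (fun s => PySem.Str.len s == k')) := by
      simp only [List.flatMap]
      exact congrArg List.flatten (List.map_congr_left hrest)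
    rw [hmapc]
    have hcov' : ∀ s ∈ pool.filter (fun s => !(PySem.Str.len s == k)), PySem.Str.len s ∈ ks := by
      intro s hs
      obtain ⟨hsp, hsk⟩ := List.mem_filter.mp hs
      rcases List.mem_cons.mp (hcov s hsp) with h | h
      · have hb : (PySem.Str.len s == k) = true := beq_iff_eq.mpr h
        rw [hb] at hsk
        exact absurd hsk (by simp)
      · exact h
    exact (List.Perm.append_left (pool.filter (fun s => PySem.Str.len s == k))
      (ih (pool.filter (fun s => !(PySem.Str.len s == k))) hnd' hcov')).trans
      (List.filter_append_perm (fun s => PySem.Str.len s == k) pool)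

-- B's output: a flatMap over the reverse-sorted keys of the reverse-sorted buckets
theorem pv_alt_eq_flatMap (original add delete : List String) :
    func_alt original add delete
    = (PySem.List.sorted
        (PySem.Set.ofList ((delete.foldl PySem.Set.discard
          (PySem.Set.update (PySem.Set.ofList original) add)).map PySem.Str.len))
        (fun k => k) true).flatMap
        (fun k => PySem.List.sorted
          ((delete.foldl PySem.Set.discard
            (PySem.Set.update (PySem.Set.ofList original) add)).filter
              (fun s => PySem.Str.len s == k)) (fun s => s) true) := by
  unfold func_alt
  rw [PySem.List.foldl_append_eq_flatMap]
  rw [pv_bucket_keys]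
  simp only [pv_bucket_getD, List.nil_append]

theorem pv_alt_perm_pool (original add delete : List String) :
    (func_alt original add delete).Perm
      (delete.foldl PySem.Set.discard (PySem.Set.update (PySem.Set.ofList original) add)) := by
  rw [pv_alt_eq_flatMap]
  set pool := delete.foldl PySem.Set.discard (PySem.Set.update (PySem.Set.ofList original) add)
    with hpool
  set ks := PySem.List.sorted (PySem.Set.ofList (pool.map PySem.Str.len)) (fun k => k) true
    with hks
  have h1 : ∀ k, (PySem.List.sorted (pool.filter (fun s => PySem.Str.len s == k))
      (fun s => s) true).Perm (pool.filter (fun s => PySem.Str.len s == k)) :=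
    fun k => PySem.List.sorted_perm _ _ _
  have hstep : (ks.flatMap (fun k => PySem.List.sorted
      (pool.filter (fun s => PySem.Str.len s == k)) (fun s => s) true)).Perm
      (ks.flatMap (fun k => pool.filter (fun s => PySem.Str.len s == k))) := by
    induction ks with
    | nil => simp
    | cons k ks ihk => simpa using (h1 k).append ihk
  refine hstep.trans ?_
  refine pv_partition_perm ks pool ?_ ?_
  · exact ((PySem.List.sorted_perm _ _ _).nodup_iff).mpr
      (PySem.Set.nodup_ofList (pool.map PySem.Str.len))
  · intro s hs
    rw [hks, PySem.List.mem_sorted]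
    exact (PySem.Set.mem_ofList _ _).mpr (List.mem_map_of_mem hs)

theorem pv_alt_pairwise (original add delete : List String) :
    (func_alt original add delete).Pairwise pvLe := by
  rw [pv_alt_eq_flatMap]
  set pool := delete.foldl PySem.Set.discard (PySem.Set.update (PySem.Set.ofList original) add)
  refine List.pairwise_flatMap.mpr ⟨?_, ?_⟩
  · -- inside a bucket: equal lengths, lexicographically descending
    intro k _
    have hs := PySem.List.sorted_pairwise_rev (pool.filter (fun s => PySem.Str.len s == k))
      (fun s => s)
    refine hs.imp_of_mem fun {a b} ha hb hba => ?_
    have hka : PySem.Str.len a = k := by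
      have := (List.mem_filter.mp ((PySem.List.mem_sorted _ _ _ _).mp ha)).2
      simpa using this
    have hkb : PySem.Str.len b = k := by
      have := (List.mem_filter.mp ((PySem.List.mem_sorted _ _ _ _).mp hb)).2
      simpa using this
    exact (pvCompare_iff a b).mpr (Or.inr ⟨by omega, not_lt.mpr hba⟩)
  · -- across buckets: strictly decreasing lengths
    have hsorted := PySem.List.sorted_pairwise_rev
      (PySem.Set.ofList (pool.map PySem.Str.len)) (fun k => k)
    have hnd : (PySem.List.sorted (PySem.Set.ofList (pool.map PySem.Str.len))
        (fun k => k) true).Nodup :=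
      ((PySem.List.sorted_perm _ _ _).nodup_iff).mpr
        (PySem.Set.nodup_ofList (pool.map PySem.Str.len))
    refine (hnd.and hsorted).imp_of_mem fun {k1 k2} _ _ hp => ?_
    obtain ⟨hne, hle⟩ := hp
    intro x hx y hy
    have hkx : PySem.Str.len x = k1 := by
      have := (List.mem_filter.mp ((PySem.List.mem_sorted _ _ _ _).mp hx)).2
      simpa using this
    have hky : PySem.Str.len y = k2 := by
      have := (List.mem_filter.mp ((PySem.List.mem_sorted _ _ _ _).mp hy)).2
      simpa using this
    exact (pvCompare_iff x y).mpr (Or.inl (by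
      have : k2 < k1 := lt_of_le_of_ne hle (fun h => hne h.symm)
      omega))

-- ===== VERDICT (by name: the statement is the Claim_ definition above) =====
theorem func_spec : Claim_equal_func := by
  intro original add delete _
  unfold Spec_func
  show pvMsort
      (delete.foldl (fun s i => if PySem.Set.contains s i then PySem.Set.discard s i else s)
        (add.foldl PySem.Set.add (original.foldl PySem.Set.add PySem.Set.empty)))
    = func_alt original add delete
  rw [pv_pool_eq]
  exact List.Perm.eq_of_pairwise
    (fun a b _ _ h1 h2 => pvCompare_antisymm h1 h2)
    (pvMsort_pairwise _) (pv_alt_pairwise original add delete)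
    ((pvMsort_perm _).trans (pv_alt_perm_pool original add delete).symm)
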